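-- pv_equiv track=rewrite | github.com/kim-seonwoo/codetree-TILs | 240802/되돌아오기 2/come-back-2.py | find_return_time
-- ===== SOURCE A (Python) =====
-- def find_return_time(commands):
--     # 방향 설정 (북, 동, 남, 서)
--     directions = ['N', 'E', 'S', 'W']
--     direction_vectors = {
--         'N': (-1, 0),
--         'E': (0, 1),
--         'S': (1, 0),
--         'W': (0, -1)
--     }
--
--     # 초기 상태
--     x, y = 0, 0
--     direction_index = 0  # 처음에는 북쪽을 향함
--     time = 0
--
--     # 명령어 처리
--     for command in commands:
--         if command == 'L':
--             direction_index = (direction_index - 1) % 4  # 왼쪽으로 90도 회전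
--             time += 1
--         elif command == 'R':
--             direction_index = (direction_index + 1) % 4  # 오른쪽으로 90도 회전
--             time += 1
--         elif command == 'F':
--             dx, dy = direction_vectors[directions[direction_index]]
--             x += dx
--             y += dy
--             time += 1
--
--         # 시작점으로 돌아온 경우
--         if x == 0 and y == 0:
--             return time
--
--     # 모든 명령어 처리 후에도 돌아오지 못한 경우
--     return -1
-- ===== SOURCE B (Python) =====
-- def find_return_time(commands):
--     # Staged pipeline instead of a stateful simulation:
--     # pass 1 records the heading before each command, pass 2 turns commands into
--     # displacement vectors, pass 3 records elapsed time after each command, and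
--     # pass 4 scans the prefix sums of the displacements for the first return.
--     VEC = [(-1, 0), (0, 1), (1, 0), (0, -1)]
--     # Pass 1: heading index in effect when each command is executed
--     headings = []
--     h = 0
--     for c in commands:
--         headings.append(h)
--         if c == 'R':
--             h = (h + 1) % 4
--         elif c == 'L':
--             h = (h - 1) % 4
--     # Pass 2: the displacement each command causes
--     steps = [VEC[hd] if c == 'F' else (0, 0) for c, hd in zip(commands, headings)]
--     # Pass 3: elapsed time after each command
--     times = []
--     t = 0
--     for c in commands:
--         t += 1 if c in ('L', 'R', 'F') else 0
--         times.append(t)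
--     # Pass 4: first prefix of the displacements summing to the origin
--     x = y = 0
--     for (sx, sy), tm in zip(steps, times):
--         x += sx
--         y += sy
--         if x == 0 and y == 0:
--             return tm
--     return -1
-- ===== Notes on version B (the rewrite author's own statement) =====
-- stated objective: alternative
-- what changed: B replaces A's single stateful step-by-step simulation by a staged pipeline: a pass recording the heading before each command, a pass mapping commands to displacement vectors, a pass of elapsed times, and a final scan of the displacement prefix sums for the first return to the origin.
import Mathlib
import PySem

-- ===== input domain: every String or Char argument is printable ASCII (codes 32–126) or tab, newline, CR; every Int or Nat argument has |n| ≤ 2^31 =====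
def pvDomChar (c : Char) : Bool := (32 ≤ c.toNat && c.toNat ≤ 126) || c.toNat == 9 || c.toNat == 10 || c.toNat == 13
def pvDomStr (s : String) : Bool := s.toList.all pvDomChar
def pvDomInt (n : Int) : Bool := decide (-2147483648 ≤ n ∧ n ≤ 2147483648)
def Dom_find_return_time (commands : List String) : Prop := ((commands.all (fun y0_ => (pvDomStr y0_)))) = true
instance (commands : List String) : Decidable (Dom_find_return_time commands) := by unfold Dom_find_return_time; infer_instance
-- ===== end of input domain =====

-- B replaces A's stateful step-by-step simulation by a staged pipeline (heading pass,
-- displacement pass, time pass, prefix-sum scan); return values are identical (alternative decomposition).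

-- ===== PORT A =====
def pvDirs : List String := ["N", "E", "S", "W"]
def pvDirVecs : PySem.Dict String (Int × Int) :=
  PySem.Dict.ofList [("N", (-1, 0)), ("E", (0, 1)), ("S", (1, 0)), ("W", (0, -1))]

-- loop of A over (x, y, direction_index, time); the list/dict lookups on 'F' cannot fail
-- (index is always in [0,3]), so the port uses getD with an unreachable default.
def pvGoA : List String → Int → Int → Int → Int → Int
  | [], _, _, _, _ => -1
  | c :: rest, x, y, di, t =>
    if c == "L" then
      let di' := PySem.Int.mod (di - 1) 4
      let t' := t + 1
      if x == 0 && y == 0 then t' else pvGoA rest x y di' t'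
    else if c == "R" then
      let di' := PySem.Int.mod (di + 1) 4
      let t' := t + 1
      if x == 0 && y == 0 then t' else pvGoA rest x y di' t'
    else if c == "F" then
      let v := (PySem.Dict.get? pvDirVecs ((PySem.List.pyGet? pvDirs di).getD "")).getD (0, 0)
      let x' := x + v.1
      let y' := y + v.2
      let t' := t + 1
      if x' == 0 && y' == 0 then t' else pvGoA rest x' y' di t'
    else
      if x == 0 && y == 0 then t else pvGoA rest x y di t

def find_return_time (commands : List String) : Int := pvGoA commands 0 0 0 0

-- ===== PORT B =====
def pvVEC : List (Int × Int) := [(-1, 0), (0, 1), (1, 0), (0, -1)]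

-- Pass 1: heading index in effect when each command is executed
def pvHeads : List String → Int → List Int
  | [], _ => []
  | c :: rest, h =>
    h :: pvHeads rest (if c == "R" then PySem.Int.mod (h + 1) 4
                       else if c == "L" then PySem.Int.mod (h - 1) 4 else h)

-- Pass 2: the displacement each command causes
def pvSteps (cmds : List String) (heads : List Int) : List (Int × Int) :=
  (cmds.zip heads).map (fun p =>
    if p.1 == "F" then (PySem.List.pyGet? pvVEC p.2).getD (0, 0) else (0, 0))

-- Pass 3: elapsed time after each command
def pvTimes : List String → Int → List Int
  | [], _ => []
  | c :: rest, t =>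
    let t' := t + (if c == "L" || c == "R" || c == "F" then 1 else 0)
    t' :: pvTimes rest t'

-- Pass 4: first prefix of the displacements summing to the origin
def pvLoop4 : List ((Int × Int) × Int) → Int → Int → Int
  | [], _, _ => -1
  | (st, tm) :: rest, x, y =>
    let x' := x + st.1
    let y' := y + st.2
    if x' == 0 && y' == 0 then tm else pvLoop4 rest x' y'

def find_return_time_alt (commands : List String) : Int :=
  pvLoop4 ((pvSteps commands (pvHeads commands 0)).zip (pvTimes commands 0)) 0 0

-- ===== PRECONDITION & SPEC =====
def Spec_find_return_time (commands : List String) (out : Int) : Prop := out = find_return_time_alt commands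
instance (commands : List String) (out : Int) : Decidable (Spec_find_return_time commands out) := by unfold Spec_find_return_time; infer_instance

-- ===== CLAIM (what is proved, stated in full; the proofs are below) =====
def Claim_equal_find_return_time : Prop := ∀ (commands : List String), Dom_find_return_time commands → Spec_find_return_time commands (find_return_time commands)

-- ===== LEMMAS AND PROOFS =====

-- steps list unfolds one command at a time
theorem pvSteps_cons (c : String) (cs : List String) (h : Int) (hs : List Int) :
    pvSteps (c :: cs) (h :: hs) =
      (if c == "F" then (PySem.List.pyGet? pvVEC h).getD (0, 0) else (0, 0)) :: pvSteps cs hs := rfl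

theorem pvGo_eq (cmds : List String) : ∀ (x y di t : Int), 0 ≤ di → di < 4 →
    pvGoA cmds x y di t =
      pvLoop4 ((pvSteps cmds (pvHeads cmds di)).zip (pvTimes cmds t)) x y := by
  induction cmds with
  | nil => intro x y di t _ _; rfl
  | cons c rest ih =>
    intro x y di t h0 h4
    have hdi : di = 0 ∨ di = 1 ∨ di = 2 ∨ di = 3 := by omega
    by_cases hL : c == "L"
    · have hc : c = "L" := by simpa using hL
      subst hc
      simp only [pvGoA, pvHeads, pvTimes, pvSteps_cons, pvLoop4,
        show (("L" : String) == "L") = true from rfl,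
        show (("L" : String) == "R") = false from rfl,
        show (("L" : String) == "F") = false from rfl, List.zip_cons_cons,
        Bool.false_eq_true, if_true, if_false, Bool.true_or, add_zero]
      rcases hdi with h | h | h | h <;> subst h <;>
        [rw [show PySem.Int.mod ((0:Int) - 1) 4 = 3 from by decide];
         rw [show PySem.Int.mod ((1:Int) - 1) 4 = 0 from by decide];
         rw [show PySem.Int.mod ((2:Int) - 1) 4 = 1 from by decide];
         rw [show PySem.Int.mod ((3:Int) - 1) 4 = 2 from by decide]] <;>
        · split
          · rfl
          · first
            | exact ih x y 3 (t + 1) (by decide) (by decide)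
            | exact ih x y 0 (t + 1) (by decide) (by decide)
            | exact ih x y 1 (t + 1) (by decide) (by decide)
            | exact ih x y 2 (t + 1) (by decide) (by decide)
    · by_cases hR : c == "R"
      · have hc : c = "R" := by simpa using hR
        subst hc
        simp only [pvGoA, pvHeads, pvTimes, pvSteps_cons, pvLoop4,
          show (("R" : String) == "L") = false from rfl,
          show (("R" : String) == "R") = true from rfl,
          show (("R" : String) == "F") = false from rfl, List.zip_cons_cons,
          Bool.false_eq_true, if_true, if_false, Bool.false_or, Bool.true_or, add_zero]
        rcases hdi with h | h | h | h <;> subst h <;>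
          [rw [show PySem.Int.mod ((0:Int) + 1) 4 = 1 from by decide];
           rw [show PySem.Int.mod ((1:Int) + 1) 4 = 2 from by decide];
           rw [show PySem.Int.mod ((2:Int) + 1) 4 = 3 from by decide];
           rw [show PySem.Int.mod ((3:Int) + 1) 4 = 0 from by decide]] <;>
          · split
            · rfl
            · first
              | exact ih x y 1 (t + 1) (by decide) (by decide)
              | exact ih x y 2 (t + 1) (by decide) (by decide)
              | exact ih x y 3 (t + 1) (by decide) (by decide)
              | exact ih x y 0 (t + 1) (by decide) (by decide)
      · by_cases hF : c == "F"
        · have hc : c = "F" := by simpa using hF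
          subst hc
          simp only [pvGoA, pvHeads, pvTimes, pvSteps_cons, pvLoop4,
            show (("F" : String) == "L") = false from rfl,
            show (("F" : String) == "R") = false from rfl,
            show (("F" : String) == "F") = true from rfl, List.zip_cons_cons,
            Bool.false_eq_true, if_true, if_false, Bool.false_or, Bool.or_true]
          rcases hdi with h | h | h | h <;> subst h <;>
            [rw [show ((PySem.Dict.get? pvDirVecs ((PySem.List.pyGet? pvDirs 0).getD "")).getD ((0:Int), (0:Int))) = (-1, 0) from by decide,
                 show ((PySem.List.pyGet? pvVEC 0).getD ((0:Int), (0:Int))) = (-1, 0) from by decide];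
             rw [show ((PySem.Dict.get? pvDirVecs ((PySem.List.pyGet? pvDirs 1).getD "")).getD ((0:Int), (0:Int))) = (0, 1) from by decide,
                 show ((PySem.List.pyGet? pvVEC 1).getD ((0:Int), (0:Int))) = (0, 1) from by decide];
             rw [show ((PySem.Dict.get? pvDirVecs ((PySem.List.pyGet? pvDirs 2).getD "")).getD ((0:Int), (0:Int))) = (1, 0) from by decide,
                 show ((PySem.List.pyGet? pvVEC 2).getD ((0:Int), (0:Int))) = (1, 0) from by decide];
             rw [show ((PySem.Dict.get? pvDirVecs ((PySem.List.pyGet? pvDirs 3).getD "")).getD ((0:Int), (0:Int))) = (0, -1) from by decide,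
                 show ((PySem.List.pyGet? pvVEC 3).getD ((0:Int), (0:Int))) = (0, -1) from by decide]] <;>
            · split
              · rfl
              · first
                | exact ih (x + -1) (y + 0) 0 (t + 1) (by decide) (by decide)
                | exact ih (x + 0) (y + 1) 1 (t + 1) (by decide) (by decide)
                | exact ih (x + 1) (y + 0) 2 (t + 1) (by decide) (by decide)
                | exact ih (x + 0) (y + -1) 3 (t + 1) (by decide) (by decide)
        · simp only [pvGoA, pvHeads, pvTimes, pvSteps_cons, pvLoop4, List.zip_cons_cons, hL, hR, hF,
            Bool.false_eq_true, if_false, Bool.false_or, Bool.or_false, add_zero]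
          split
          · rfl
          · exact ih x y di t h0 h4

-- ===== VERDICT (by name: the statement is the Claim_ definition above) =====
theorem find_return_time_spec : Claim_equal_find_return_time := by
  intro commands _
  unfold Spec_find_return_time find_return_time find_return_time_alt
  exact pvGo_eq commands 0 0 0 0 (by decide) (by decide)
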